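-- pv_equiv track=rewrite | github.com/rhoboro/events | pycon.apac.20231026/src/sqlite_02.py | get_a_varint
-- ===== SOURCE A (Python) =====
-- def get_a_varint(byte_list: bytes) -> tuple[int, int]:
--     consumed = 0
--     value = 0b00000000
--     for byte in byte_list:
--         consumed += 1
--         if consumed >= 9:
--             value = value << 8 | byte
--             return value, consumed
--
--         value = value << 7 | (byte & 0b01111111)
--         has_next = byte >> 7
--         if not has_next:
--             return value, consumed
--     else:
--         raise ValueError()
-- ===== SOURCE B (Python) =====
-- def get_a_varint(byte_list):
--     # Pass 1: locate the terminator to get the consumed length.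
--     length = None
--     for i in range(min(len(byte_list), 8)):
--         if byte_list[i] >> 7 == 0:
--             length = i + 1
--             break
--     if length is None:
--         if len(byte_list) >= 9:
--             length = 9
--         else:
--             raise ValueError()
--     # Pass 2: fold the consumed bytes into the value.
--     value = 0
--     for i, b in enumerate(byte_list[:length]):
--         if i == 8:
--             value = value << 8 | b
--         else:
--             value = value << 7 | (b & 0x7f)
--     return value, length
-- ===== Notes on version B (the rewrite author's own statement) =====
-- stated objective: alternative
-- what changed: B replaces A's single combined loop (which accumulates the value and counts while scanning) with two separate passes: first locate the terminator byte to compute the consumed length, then fold exactly that prefix into the value.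
import Mathlib
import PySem

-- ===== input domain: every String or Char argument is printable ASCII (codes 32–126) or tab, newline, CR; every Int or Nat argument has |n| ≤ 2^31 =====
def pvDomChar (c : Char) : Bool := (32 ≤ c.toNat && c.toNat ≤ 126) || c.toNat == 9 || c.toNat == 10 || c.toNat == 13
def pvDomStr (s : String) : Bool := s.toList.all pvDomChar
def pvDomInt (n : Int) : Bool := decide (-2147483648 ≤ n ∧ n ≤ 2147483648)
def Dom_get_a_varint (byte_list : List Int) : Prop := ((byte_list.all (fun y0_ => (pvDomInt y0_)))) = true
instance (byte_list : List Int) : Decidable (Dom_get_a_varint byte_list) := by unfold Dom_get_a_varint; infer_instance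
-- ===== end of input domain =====

-- B separates locating the terminator (first pass) from accumulating the value
-- (second pass over a slice), replacing A's single combined loop; objective: alternative decomposition.

-- ===== PORT A =====
-- A's single loop, carrying (consumed, value); the ValueError fall-through is (0, 0), excluded by Pre_.
def pvGoA : List Int → Int → Int → Int × Int
  | [], _, _ => (0, 0)
  | b :: rest, consumed, value =>
    let consumed := consumed + 1
    if 9 ≤ consumed then
      (PySem.Int.bor (value <<< 8) b, consumed)
    else
      let value := PySem.Int.bor (value <<< 7) (PySem.Int.band b 127)
      let has_next := b >>> 7
      if has_next = 0 then (value, consumed) else pvGoA rest consumed value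

def get_a_varint (byte_list : List Int) : Int × Int :=
  pvGoA byte_list 0 0

-- ===== PORT B =====
-- pass 1: scan the first min(len, 8) bytes for the terminator, returning the consumed length
def pvFindLen : List Int → Nat → Option Nat
  | [], _ => none
  | b :: rest, i => if 8 ≤ i then none else if b >>> 7 = 0 then some (i + 1) else pvFindLen rest (i + 1)

-- pass 2: fold the consumed prefix into the value (index i, 9th byte contributes 8 bits)
def pvFoldVal : List Int → Nat → Int → Int
  | [], _, v => v
  | b :: rest, i, v =>
    pvFoldVal rest (i + 1)
      (if i = 8 then PySem.Int.bor (v <<< 8) b else PySem.Int.bor (v <<< 7) (PySem.Int.band b 127))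

def get_a_varint_alt (byte_list : List Int) : Int × Int :=
  match pvFindLen byte_list 0 with
  | some L => (pvFoldVal (byte_list.take L) 0 0, (L : Int))
  | none =>
    if 9 ≤ byte_list.length then (pvFoldVal (byte_list.take 9) 0 0, 9)
    else (0, 0)  -- ValueError in Source B; excluded by Pre_

-- ===== PRECONDITION & SPEC =====
-- Pre_ excludes exactly the inputs on which A raises ValueError: fewer than 9 bytes,
-- all of them with the continuation bit set (no byte in [0, 128) among the first 8).
def Pre_get_a_varint (byte_list : List Int) : Prop :=
  9 ≤ byte_list.length ∨ ∃ b ∈ byte_list.take 8, 0 ≤ b ∧ b < 128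
instance (byte_list : List Int) : Decidable (Pre_get_a_varint byte_list) := by
  unfold Pre_get_a_varint; infer_instance

def pvWitness_get_a_varint : List Int := [200, 5]

def Spec_get_a_varint (byte_list : List Int) (out : Int × Int) : Prop := out = get_a_varint_alt byte_list
instance (byte_list : List Int) (out : Int × Int) : Decidable (Spec_get_a_varint byte_list out) := by unfold Spec_get_a_varint; infer_instance

-- ===== CLAIM (what is proved, stated in full; the proofs are below) =====
def Claim_equal_get_a_varint : Prop := ∀ (byte_list : List Int), Dom_get_a_varint byte_list → Pre_get_a_varint byte_list → Spec_get_a_varint byte_list (get_a_varint byte_list)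

-- ===== LEMMAS AND PROOFS =====

lemma pvFindLen_gt : ∀ (l : List Int) (i L : Nat), pvFindLen l i = some L → i < L := by
  intro l
  induction l with
  | nil => intro i L h; simp [pvFindLen] at h
  | cons b rest ih =>
    intro i L h
    rw [pvFindLen] at h
    by_cases h8 : 8 ≤ i
    · rw [if_pos h8] at h; exact absurd h (by simp)
    · rw [if_neg h8] at h
      by_cases ht : b >>> 7 = 0
      · rw [if_pos ht] at h
        have : i + 1 = L := by simpa using h
        omega
      · rw [if_neg ht] at h
        have := ih (i + 1) L h
        omega

lemma pvGoA_eq : ∀ (l : List Int) (i : Nat) (v : Int), i ≤ 8 →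
    pvGoA l (i : Int) v =
      (match pvFindLen l i with
       | some L => (pvFoldVal (l.take (L - i)) i v, (L : Int))
       | none =>
         if 9 ≤ i + l.length then (pvFoldVal (l.take (9 - i)) i v, 9) else (0, 0)) := by
  intro l
  induction l with
  | nil =>
    intro i v hi
    simp [pvGoA, pvFindLen]
    omega
  | cons b rest ih =>
    intro i v hi
    by_cases h8 : i = 8
    · subst h8
      simp only [pvGoA, pvFindLen]
      have h9 : (9 : Int) ≤ (8 : Nat) + 1 := by norm_num
      rw [if_pos h9, if_pos (by norm_num : 8 ≤ 8)]
      simp [pvFoldVal]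
      omega
    · have hlt : i < 8 := lt_of_le_of_ne hi h8
      simp only [pvGoA, pvFindLen]
      have h9 : ¬ ((9 : Int) ≤ (i : Nat) + 1) := by omega
      rw [if_neg h9, if_neg (by omega : ¬ 8 ≤ i)]
      by_cases ht : b >>> 7 = 0
      · rw [if_pos ht, if_pos ht]
        have h1 : (i + 1) - i = 1 := by omega
        simp [h1, pvFoldVal, h8]
      · rw [if_neg ht, if_neg ht]
        have hcast : ((i : Int) + 1) = ((i + 1 : Nat) : Int) := by push_cast; ring
        rw [hcast, ih (i + 1) _ (by omega)]
        cases hfind : pvFindLen rest (i + 1) with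
        | some L =>
          have hL : i + 1 < L := pvFindLen_gt rest (i + 1) L hfind
          simp only
          have htake : (b :: rest).take (L - i) = b :: rest.take (L - (i + 1)) := by
            have : L - i = (L - (i + 1)) + 1 := by omega
            simp [this]
          rw [htake]
          simp [pvFoldVal, h8]
        | none =>
          simp only
          have hlen : (9 ≤ (i + 1) + rest.length) ↔ (9 ≤ i + (b :: rest).length) := by
            simp [List.length]; omega
          by_cases hc : 9 ≤ (i + 1) + rest.length
          · rw [if_pos hc, if_pos (hlen.mp hc)]
            have htake : (b :: rest).take (9 - i) = b :: rest.take (9 - (i + 1)) := by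
              have : 9 - i = (9 - (i + 1)) + 1 := by omega
              simp [this]
            rw [htake]
            simp [pvFoldVal, h8]
          · rw [if_neg hc, if_neg (fun h => hc (hlen.mpr h))]

lemma ports_agree (byte_list : List Int) : get_a_varint byte_list = get_a_varint_alt byte_list := by
  have h := pvGoA_eq byte_list 0 0 (by norm_num)
  simp only [Nat.cast_zero] at h
  unfold get_a_varint get_a_varint_alt
  rw [h]
  cases hfind : pvFindLen byte_list 0 with
  | some L => simp
  | none => simp

-- ===== VERDICT (by name: the statement is the Claim_ definition above) =====
theorem get_a_varint_spec : Claim_equal_get_a_varint := by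
  intro byte_list _ _
  unfold Spec_get_a_varint
  exact ports_agree byte_list
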